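/- GENERATED by farm/mkstatement.py from design/units.split.tsv — do not edit.
   THE SPLIT of the proof unit `compute_codewords` into `compute_codewords.1`, `compute_codewords.2`, `compute_codewords.3`, `compute_codewords.4`, `compute_codewords.5`, `compute_codewords.6`, `compute_codewords.7`, `compute_codewords.8`, `compute_codewords.9`, `compute_codewords.COMPOSITION`: the children's statements give the parent's
   UNCHANGED statement (so nothing above the parent — callers, compositions — is touched by the split). -/
import Vorbis.Spec.Units.compute_codewords
import Vorbis.Spec.Units.compute_codewords_1
import Vorbis.Spec.Units.compute_codewords_2
import Vorbis.Spec.Units.compute_codewords_3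
import Vorbis.Spec.Units.compute_codewords_4
import Vorbis.Spec.Units.compute_codewords_5
import Vorbis.Spec.Units.compute_codewords_6
import Vorbis.Spec.Units.compute_codewords_7
import Vorbis.Spec.Units.compute_codewords_8
import Vorbis.Spec.Units.compute_codewords_9
import Vorbis.Spec.Units.compute_codewords_COMPOSITION
namespace Vorbis.Spec.Splits
open X86 X86.User Asan

/-- The segments of the split function `compute_codewords` and their composition prove its contract. -/
theorem compute_codewords
    (h_compute_codewords_1 : Vorbis.Spec.compute_codewords_1.Statement)
    (h_compute_codewords_2 : Vorbis.Spec.compute_codewords_2.Statement)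
    (h_compute_codewords_3 : Vorbis.Spec.compute_codewords_3.Statement)
    (h_compute_codewords_4 : Vorbis.Spec.compute_codewords_4.Statement)
    (h_compute_codewords_5 : Vorbis.Spec.compute_codewords_5.Statement)
    (h_compute_codewords_6 : Vorbis.Spec.compute_codewords_6.Statement)
    (h_compute_codewords_7 : Vorbis.Spec.compute_codewords_7.Statement)
    (h_compute_codewords_8 : Vorbis.Spec.compute_codewords_8.Statement)
    (h_compute_codewords_9 : Vorbis.Spec.compute_codewords_9.Statement)
    (h_compute_codewords_COMPOSITION : Vorbis.Spec.compute_codewords_COMPOSITION.Statement) :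
    Vorbis.Spec.compute_codewords.Statement := by
  intro Lay _hLay μ _hμ u₀ _hcode _h_memset _h_asan_load1_noabort _h_add_entry _h_asan_store4_noabort _h_asan_load4_noabort _h_bit_reverse
  exact h_compute_codewords_COMPOSITION Lay _hLay μ _hμ u₀
    (h_compute_codewords_1 Lay _hLay μ _hμ u₀ _hcode _h_memset)
    (h_compute_codewords_2 Lay _hLay μ _hμ u₀ _hcode _h_asan_load1_noabort)
    (h_compute_codewords_3 Lay _hLay μ _hμ u₀ _hcode _h_asan_load1_noabort _h_add_entry)
    (h_compute_codewords_4 Lay _hLay μ _hμ u₀ _hcode _h_asan_store4_noabort)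
    (h_compute_codewords_5 Lay _hLay μ _hμ u₀ _hcode)
    (h_compute_codewords_6 Lay _hLay μ _hμ u₀ _hcode _h_asan_load1_noabort)
    (h_compute_codewords_7 Lay _hLay μ _hμ u₀ _hcode _h_asan_load4_noabort)
    (h_compute_codewords_8 Lay _hLay μ _hμ u₀ _hcode _h_add_entry _h_asan_load4_noabort _h_bit_reverse)
    (h_compute_codewords_9 Lay _hLay μ _hμ u₀ _hcode _h_asan_store4_noabort)

end Vorbis.Spec.Splits
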